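-- pv_equiv track=rewrite | github.com/pratik-nagelia/AnswerChecker | noun_verb_noun.py | separate_nvn
-- ===== SOURCE A (Python) =====
-- from collections import namedtuple
--
-- nvnTuple = namedtuple('nvnTuple', ('Noun1', 'Verb', 'Noun2'))
--
-- def separate_nvn(tagged_string):
--     subject = True
--     noun1 = []
--     noun2 = []
--     verb = []
--     for tag in tagged_string:
--         if tag[1][0] == 'N' and subject is True:
--             noun1.append(tag)
--         elif tag[1][0] == 'V':
--             verb.append(tag)
--             subject = False
--         elif tag[1][0] == 'N':
--             noun2.append(tag)
--     nvntuple = nvnTuple(Noun1=noun1, Verb=verb, Noun2=noun2)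
--     return nvntuple
-- ===== SOURCE B (Python) =====
-- from collections import namedtuple
--
-- nvnTuple = namedtuple('nvnTuple', ('Noun1', 'Verb', 'Noun2'))
--
-- def separate_nvn(tagged_string):
--     tokens = list(tagged_string)
--     idx = next((i for i, t in enumerate(tokens) if t[1][0] == 'V'), len(tokens))
--     noun1 = [t for t in tokens[:idx] if t[1][0] == 'N']
--     verb = [t for t in tokens[idx:] if t[1][0] == 'V']
--     noun2 = [t for t in tokens[idx:] if t[1][0] == 'N']
--     return nvnTuple(Noun1=noun1, Verb=verb, Noun2=noun2)
-- ===== Notes on version B (the rewrite author's own statement) =====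
-- stated objective: alternative
-- what changed: Replaces the single stateful scan with a 'subject' flag by a find-first-verb boundary followed by three independent filters over the two halves of the token list.
import Mathlib
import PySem

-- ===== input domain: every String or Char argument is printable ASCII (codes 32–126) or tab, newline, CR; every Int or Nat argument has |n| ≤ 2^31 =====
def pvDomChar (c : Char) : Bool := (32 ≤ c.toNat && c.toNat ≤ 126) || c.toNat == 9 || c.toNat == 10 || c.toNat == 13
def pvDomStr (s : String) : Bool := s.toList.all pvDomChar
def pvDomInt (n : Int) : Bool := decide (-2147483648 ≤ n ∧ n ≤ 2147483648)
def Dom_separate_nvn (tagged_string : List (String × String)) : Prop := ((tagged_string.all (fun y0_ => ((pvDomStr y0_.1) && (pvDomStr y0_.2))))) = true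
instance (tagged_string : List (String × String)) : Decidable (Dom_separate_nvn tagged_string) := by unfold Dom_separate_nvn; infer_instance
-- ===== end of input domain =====

-- B replaces A's single stateful scan (a 'subject' flag) by finding the first-verb boundary
-- and filtering the two halves independently (objective: alternative decomposition).

-- ===== PORT A =====
-- A's loop: state (subject, noun1, verb, noun2); tag[1][0] ported as PySem.Str.pyGet? tag.2 0
def separate_nvn_go (subject : Bool) (noun1 verb noun2 : List (String × String)) :
    List (String × String) → (List (String × String)) × (List (String × String)) × (List (String × String))
  | [] => (noun1, verb, noun2)
  | tag :: rest =>
    if (PySem.Str.pyGet? tag.2 0 == some 'N') && subject then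
      separate_nvn_go subject (noun1 ++ [tag]) verb noun2 rest
    else if PySem.Str.pyGet? tag.2 0 == some 'V' then
      separate_nvn_go false noun1 (verb ++ [tag]) noun2 rest
    else if PySem.Str.pyGet? tag.2 0 == some 'N' then
      separate_nvn_go subject noun1 verb (noun2 ++ [tag]) rest
    else
      separate_nvn_go subject noun1 verb noun2 rest

def separate_nvn (tagged_string : List (String × String)) :
    (List (String × String)) × (List (String × String)) × (List (String × String)) :=
  separate_nvn_go true [] [] [] tagged_string

-- ===== PORT B =====
def separate_nvn_alt (tagged_string : List (String × String)) :
    (List (String × String)) × (List (String × String)) × (List (String × String)) :=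
  let tokens := tagged_string
  let idx := tokens.findIdx (fun t => PySem.Str.pyGet? t.2 0 == some 'V')
  let noun1 := (tokens.take idx).filter (fun t => PySem.Str.pyGet? t.2 0 == some 'N')
  let verb := (tokens.drop idx).filter (fun t => PySem.Str.pyGet? t.2 0 == some 'V')
  let noun2 := (tokens.drop idx).filter (fun t => PySem.Str.pyGet? t.2 0 == some 'N')
  (noun1, verb, noun2)

-- ===== PRECONDITION & SPEC =====
-- Pre_ excludes tags with an empty tag string, on which Python A raises IndexError at tag[1][0].
def Pre_separate_nvn (tagged_string : List (String × String)) : Prop :=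
  ∀ t ∈ tagged_string, t.2 ≠ ""
instance (tagged_string : List (String × String)) : Decidable (Pre_separate_nvn tagged_string) := by
  unfold Pre_separate_nvn; infer_instance
def pvWitness_separate_nvn : (List (String × String)) := [("cat", "NN"), ("runs", "VBZ"), ("home", "NN")]

def Spec_separate_nvn (tagged_string : List (String × String)) (out : (List (String × String)) × (List (String × String)) × (List (String × String))) : Prop := out = separate_nvn_alt tagged_string
instance (tagged_string : List (String × String)) (out : (List (String × String)) × (List (String × String)) × (List (String × String))) : Decidable (Spec_separate_nvn tagged_string out) := by unfold Spec_separate_nvn; infer_instance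

-- ===== CLAIM (what is proved, stated in full; the proofs are below) =====
def Claim_equal_separate_nvn : Prop := ∀ (tagged_string : List (String × String)), Dom_separate_nvn tagged_string → Pre_separate_nvn tagged_string → Spec_separate_nvn tagged_string (separate_nvn tagged_string)

-- ===== LEMMAS AND PROOFS =====

-- After the first verb (subject = false), A just filters the rest into verb/noun2.
lemma separate_nvn_go_false (noun1 verb noun2 : List (String × String)) (ts : List (String × String)) :
    separate_nvn_go false noun1 verb noun2 ts =
      (noun1,
       verb ++ ts.filter (fun t => PySem.Str.pyGet? t.2 0 == some 'V'),
       noun2 ++ ts.filter (fun t => PySem.Str.pyGet? t.2 0 == some 'N')) := by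
  induction ts generalizing verb noun2 with
  | nil => simp [separate_nvn_go]
  | cons t rest ih =>
    simp only [separate_nvn_go, Bool.and_false]
    by_cases hV : PySem.List.pyGet? t.2.toList 0 = some 'V'
    · simp [hV, ih]
    · by_cases hN : PySem.List.pyGet? t.2.toList 0 = some 'N'
      · simp [hN, ih, List.filter_cons]
      · simp [hV, hN, ih]

-- Before any verb (subject = true), A's result is B's boundary decomposition.
lemma separate_nvn_go_true (noun1 verb noun2 : List (String × String)) (ts : List (String × String)) :
    separate_nvn_go true noun1 verb noun2 ts =
      (noun1 ++ (ts.take (ts.findIdx (fun t => PySem.Str.pyGet? t.2 0 == some 'V'))).filter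
          (fun t => PySem.Str.pyGet? t.2 0 == some 'N'),
       verb ++ (ts.drop (ts.findIdx (fun t => PySem.Str.pyGet? t.2 0 == some 'V'))).filter
          (fun t => PySem.Str.pyGet? t.2 0 == some 'V'),
       noun2 ++ (ts.drop (ts.findIdx (fun t => PySem.Str.pyGet? t.2 0 == some 'V'))).filter
          (fun t => PySem.Str.pyGet? t.2 0 == some 'N')) := by
  induction ts generalizing noun1 with
  | nil => simp [separate_nvn_go]
  | cons t rest ih =>
    by_cases hV : PySem.List.pyGet? t.2.toList 0 = some 'V'
    · have hN : ¬ PySem.List.pyGet? t.2.toList 0 = some 'N' := by simp [hV]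
      simp [separate_nvn_go, hV, hN, List.findIdx_cons, separate_nvn_go_false]
    · by_cases hN : PySem.List.pyGet? t.2.toList 0 = some 'N'
      · simp [separate_nvn_go, hN, List.findIdx_cons, ih]
      · have hV' : (PySem.List.pyGet? t.2.toList 0 == some 'V') = false := by simp [hV]
        simp [separate_nvn_go, hV, hN, hV', List.findIdx_cons, ih]

-- ===== VERDICT (by name: the statement is the Claim_ definition above) =====
theorem separate_nvn_spec : Claim_equal_separate_nvn := by
  intro ts _ _
  unfold Spec_separate_nvn separate_nvn separate_nvn_alt
  simp [separate_nvn_go_true]
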